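-- pv_equiv track=rewrite | github.com/theophanevie/advent-of-code | aoc2023/day23/ex2/solver.py | find_junctions
-- ===== SOURCE A (Python) =====
-- POS = tuple[int, int]
--
-- def find_junctions(grid: list[str]) -> set[POS]:
--     junctions = set()
--     size = len(grid)
--
--     for y in range(size):
--         for x in range(size):
--             if grid[y][x] == "#":
--                 continue
--
--             neighbour_count = 0
--             for dx, dy in [(1, 0), (-1, 0), (0, 1), (0, -1)]:
--                 if 0 <= x + dx < size and 0 <= y + dy < size and grid[y + dy][x + dx] != "#":
--                     neighbour_count += 1
--
--             if neighbour_count > 2: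
--                 junctions.add((y, x))
--
--     return junctions
-- ===== SOURCE B (Python) =====
-- def _bump(deg, k):
--     deg[k] = deg.get(k, 0) + 1
--
--
-- def find_junctions(grid: list[str]) -> set[tuple[int, int]]:
--     size = len(grid)
--     deg = {}
--     for y in range(size):
--         for x in range(size):
--             if grid[y][x] == "#":
--                 continue
--             if x + 1 < size and grid[y][x + 1] != "#":
--                 _bump(deg, (y, x))
--                 _bump(deg, (y, x + 1))
--             if y + 1 < size and grid[y + 1][x] != "#":
--                 _bump(deg, (y, x))
--                 _bump(deg, (y + 1, x))
--     return {(y, x) for y in range(size) for x in range(size) if deg.get((y, x), 0) > 2}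
-- ===== Notes on version B (the rewrite author's own statement) =====
-- stated objective: alternative
-- what changed: Replaces the per-cell 4-neighbour scan with a single edge-accumulation pass: every right/down adjacent pair of non-wall cells increments a degree dict for both endpoints, then cells of degree > 2 are collected.
import Mathlib
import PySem

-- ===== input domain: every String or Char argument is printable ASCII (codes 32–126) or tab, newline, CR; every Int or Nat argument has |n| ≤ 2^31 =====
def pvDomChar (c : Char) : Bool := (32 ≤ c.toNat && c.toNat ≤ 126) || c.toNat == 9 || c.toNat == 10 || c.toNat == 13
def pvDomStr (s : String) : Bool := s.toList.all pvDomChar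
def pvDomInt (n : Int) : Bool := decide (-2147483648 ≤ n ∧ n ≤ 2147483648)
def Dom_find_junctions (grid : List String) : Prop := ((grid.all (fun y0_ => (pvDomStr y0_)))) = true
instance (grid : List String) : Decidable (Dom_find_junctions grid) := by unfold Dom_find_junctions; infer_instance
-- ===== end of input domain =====

-- B replaces A's per-cell 4-neighbour scan by one edge-accumulation pass over right/down
-- adjacent pairs into a degree dict; equivalence of the return value (a set) is proved
-- as equality of the PySem.Set element lists.

-- grid[y][x] (shared by both ports: both Pythons index the grid this way)
def pvCell (grid : List String) (y x : Int) : Option Char :=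
  (PySem.List.pyGet? grid y).bind (fun row => PySem.Str.pyGet? row x)

-- ===== PORT A =====
def find_junctions (grid : List String) : List (Int × Int) :=
  let size : Int := grid.length
  (PySem.List.pyRange 0 size 1).foldl (fun junctions y =>
    (PySem.List.pyRange 0 size 1).foldl (fun junctions x =>
      match pvCell grid y x with
      | none => junctions
      | some c =>
        if c = '#' then junctions
        else
          let cnt : Int := ([((1:Int),(0:Int)), (-1,0), (0,1), (0,-1)]).foldl
            (fun n d =>
              if 0 ≤ x + d.1 ∧ x + d.1 < size ∧ 0 ≤ y + d.2 ∧ y + d.2 < size ∧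
                  pvCell grid (y + d.2) (x + d.1) ≠ some '#'
              then n + 1 else n) 0
          if cnt > 2 then PySem.Set.add junctions (y, x) else junctions)
      junctions) []

-- ===== PORT B =====
-- deg[k] = deg.get(k, 0) + 1
def pvBump (d : PySem.Dict (Int × Int) Int) (k : Int × Int) : PySem.Dict (Int × Int) Int :=
  d.insert k (d.getD k 0 + 1)

-- the body of B's accumulation loop for one cell (y, x)
def pvDegStep (grid : List String) (size : Int) (d : PySem.Dict (Int × Int) Int) (y x : Int) :
    PySem.Dict (Int × Int) Int :=
  match pvCell grid y x with
  | none => d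
  | some c =>
    if c = '#' then d
    else
      let d1 := if x + 1 < size ∧ pvCell grid y (x + 1) ≠ some '#'
                then pvBump (pvBump d (y, x)) (y, x + 1) else d
      if y + 1 < size ∧ pvCell grid (y + 1) x ≠ some '#'
      then pvBump (pvBump d1 (y, x)) (y + 1, x) else d1

def find_junctions_alt (grid : List String) : List (Int × Int) :=
  let size : Int := grid.length
  let deg := (PySem.List.pyRange 0 size 1).foldl (fun d y =>
    (PySem.List.pyRange 0 size 1).foldl (fun d x => pvDegStep grid size d y x) d)
    PySem.Dict.empty
  (PySem.List.pyRange 0 size 1).foldl (fun s y =>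
    (PySem.List.pyRange 0 size 1).foldl (fun s x =>
      if deg.getD (y, x) 0 > 2 then PySem.Set.add s (y, x) else s) s) []

-- ===== PRECONDITION & SPEC =====
-- Pre_ excludes exactly the grids on which A raises IndexError: some row shorter than len(grid).
def Pre_find_junctions (grid : List String) : Prop :=
  ∀ row ∈ grid, grid.length ≤ row.toList.length
instance (grid : List String) : Decidable (Pre_find_junctions grid) := by
  unfold Pre_find_junctions; infer_instance

def pvWitness_find_junctions : List String := ["...", ".#.", "..."]

def Spec_find_junctions (grid : List String) (out : List (Int × Int)) : Prop := out = find_junctions_alt grid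
instance (grid : List String) (out : List (Int × Int)) : Decidable (Spec_find_junctions grid out) := by unfold Spec_find_junctions; infer_instance

-- ===== CLAIM (what is proved, stated in full; the proofs are below) =====
def Claim_equal_find_junctions : Prop := ∀ (grid : List String), Dom_find_junctions grid → Pre_find_junctions grid → Spec_find_junctions grid (find_junctions grid)

-- ===== LEMMAS AND PROOFS =====


theorem pvBump_getD (d : PySem.Dict (Int × Int) Int) (k k' : Int × Int) :
    (pvBump d k).getD k' 0 = d.getD k' 0 + (if k' = k then 1 else 0) := by
  unfold pvBump
  rw [PySem.Dict.getD_insert]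
  split_ifs with h
  · subst h; ring
  · ring

theorem pvCond2Bump_getD (P : Prop) [Decidable P] (d : PySem.Dict (Int × Int) Int)
    (a b k : Int × Int) :
    (if P then pvBump (pvBump d a) b else d).getD k 0
      = d.getD k 0 + (if P then (if k = a then 1 else 0) + (if k = b then 1 else 0) else 0) := by
  by_cases h : P
  · simp only [if_pos h, pvBump_getD]; ring
  · simp only [if_neg h]; ring

-- contribution of cell (y, x)'s loop body to deg[k]
def pvContrib (grid : List String) (size y x : Int) (k : Int × Int) : Int :=
  match pvCell grid y x with
  | none => 0
  | some c =>
    if c = '#' then 0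
    else
      (if x + 1 < size ∧ pvCell grid y (x + 1) ≠ some '#'
       then (if k = (y, x) then 1 else 0) + (if k = (y, x + 1) then 1 else 0) else 0)
      + (if y + 1 < size ∧ pvCell grid (y + 1) x ≠ some '#'
       then (if k = (y, x) then 1 else 0) + (if k = (y + 1, x) then 1 else 0) else 0)

theorem pvDegStep_getD (grid : List String) (size : Int) (d : PySem.Dict (Int × Int) Int)
    (y x : Int) (k : Int × Int) :
    (pvDegStep grid size d y x).getD k 0 = d.getD k 0 + pvContrib grid size y x k := by
  unfold pvDegStep pvContrib
  cases h : pvCell grid y x with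
  | none => simp
  | some c =>
    by_cases hc : c = '#'
    · simp [hc]
    · simp only [hc, if_false, pvCond2Bump_getD]
      ring

theorem pvInnerFold_getD (grid : List String) (size y : Int) (l : List Int)
    (d : PySem.Dict (Int × Int) Int) (k : Int × Int) :
    ((l.foldl (fun d x => pvDegStep grid size d y x) d).getD k 0)
      = d.getD k 0 + (l.map (fun x => pvContrib grid size y x k)).sum := by
  induction l generalizing d with
  | nil => simp
  | cons a l ih => simp [ih, pvDegStep_getD]; ring

theorem pvOuterFold_getD (grid : List String) (size : Int) (l : List Int)
    (d : PySem.Dict (Int × Int) Int) (k : Int × Int) :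
    ((l.foldl (fun d y => (PySem.List.pyRange 0 size 1).foldl
        (fun d x => pvDegStep grid size d y x) d) d).getD k 0)
      = d.getD k 0 + (l.map (fun y =>
          ((PySem.List.pyRange 0 size 1).map (fun x => pvContrib grid size y x k)).sum)).sum := by
  induction l generalizing d with
  | nil => simp
  | cons a l ih => simp [ih, pvInnerFold_getD]; ring

theorem sum_ite_single (c t : Int) (l : List Int) (hnd : l.Nodup) :
    (l.map (fun j => if j = t then c else 0)).sum = if t ∈ l then c else 0 := by
  induction l with
  | nil => simp
  | cons a l ih =>
    have ha : a ∉ l := (List.nodup_cons.mp hnd).1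
    have ih' := ih (List.nodup_cons.mp hnd).2
    simp only [List.map_cons, List.sum_cons, ih', List.mem_cons]
    by_cases h1 : a = t
    · subst h1; simp [ha]
    · have h2 : t ≠ a := fun h => h1 h.symm
      simp [h1, h2]

theorem sum_map_support1 {f : Int → Int} {t : Int}
    (h : ∀ j, j ≠ t → f j = 0) (l : List Int) (hnd : l.Nodup) :
    (l.map f).sum = if t ∈ l then f t else 0 := by
  have hf : ∀ j ∈ l, f j = (fun j => if j = t then f t else 0) j := by
    intro j _
    by_cases e : j = t
    · subst e; simp
    · simp [e, h j e]
  rw [List.map_congr_left hf, sum_ite_single _ _ _ hnd]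

theorem sum_map_support2 {f : Int → Int} {t₁ t₂ : Int} (hne : t₁ ≠ t₂)
    (h : ∀ j, j ≠ t₁ → j ≠ t₂ → f j = 0) (l : List Int) (hnd : l.Nodup) :
    (l.map f).sum = (if t₁ ∈ l then f t₁ else 0) + (if t₂ ∈ l then f t₂ else 0) := by
  have hf : ∀ j ∈ l, f j
      = (fun j => (if j = t₁ then f t₁ else 0) + (if j = t₂ then f t₂ else 0)) j := by
    intro j _
    by_cases e1 : j = t₁
    · subst e1; simp [hne]
    · by_cases e2 : j = t₂
      · subst e2; simp [Ne.symm hne]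
      · simp [e1, e2, h j e1 e2]
  rw [List.map_congr_left hf, PySem.List.sum_map_add_int,
    sum_ite_single _ _ _ hnd, sum_ite_single _ _ _ hnd]

theorem pvContrib_support (grid : List String) (size y x : Int) (k : Int × Int)
    (h1 : k ≠ (y, x)) (h2 : k ≠ (y, x + 1)) (h3 : k ≠ (y + 1, x)) :
    pvContrib grid size y x k = 0 := by
  unfold pvContrib
  cases pvCell grid y x with
  | none => rfl
  | some c => split_ifs <;> simp_all

theorem pvCell_some (grid : List String) (hpre : Pre_find_junctions grid) (y x : Int)
    (hy0 : 0 ≤ y) (hy1 : y < (grid.length : Int)) (hx0 : 0 ≤ x) (hx1 : x < (grid.length : Int)) :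
    ∃ c, pvCell grid y x = some c := by
  have hyn : y.toNat < grid.length := by omega
  unfold pvCell
  rw [PySem.List.pyGet?_eq_some_getElem grid hy0 (by exact_mod_cast hy1)]
  have hlen := hpre _ (List.getElem_mem hyn)
  have hx2 : x < (((grid[y.toNat]'hyn).toList.length : Nat) : Int) := by
    have h2 : (grid.length : Int) ≤ ((grid[y.toNat]'hyn).toList.length : Int) := by
      exact_mod_cast hlen
    omega
  show ∃ c, PySem.Str.pyGet? (grid[y.toNat]'hyn) x = some c
  rw [PySem.Str.pyGet?_eq, PySem.Chars.pyGet?_eq_listPyGet?,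
    PySem.List.pyGet?_eq_some_getElem _ hx0 hx2]
  exact ⟨_, rfl⟩

theorem pv_ite_add (c : Prop) [Decidable c] (n : Int) :
    (if c then n + 1 else n) = n + (if c then 1 else 0) := by
  split_ifs <;> ring

theorem contrib_center (grid : List String) (S y x : Int) (c : Char)
    (hc : pvCell grid y x = some c) (hcw : ¬ c = '#') :
    pvContrib grid S y x (y, x)
      = (if x + 1 < S ∧ pvCell grid y (x + 1) ≠ some '#' then 1 else 0)
        + (if y + 1 < S ∧ pvCell grid (y + 1) x ≠ some '#' then 1 else 0) := by
  have e1 : ¬((y, x) = ((y, x + 1) : Int × Int)) := by simp only [Prod.mk.injEq, not_and]; intro h; omega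
  have e2 : ¬((y, x) = ((y + 1, x) : Int × Int)) := by simp only [Prod.mk.injEq, not_and]; intro h; omega
  unfold pvContrib
  rw [hc]
  simp [hcw, e1, e2]

theorem contrib_left (grid : List String) (S y x : Int) (c c' : Char)
    (hcL : pvCell grid y (x - 1) = some c') (hcC : pvCell grid y x = some c) (hx1 : x < S) :
    pvContrib grid S y (x - 1) (y, x) = if c' ≠ '#' ∧ c ≠ '#' then 1 else 0 := by
  have hxx : x - 1 + 1 = x := by ring
  have e1 : ¬((y, x) = ((y, x - 1) : Int × Int)) := by simp only [Prod.mk.injEq, not_and]; intro h; omega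
  have e2 : ¬((y, x) = ((y + 1, x - 1) : Int × Int)) := by simp only [Prod.mk.injEq, not_and]; intro h; omega
  unfold pvContrib
  rw [hcL, hxx]
  simp [hcC, hx1, e1, e2]
  split_ifs <;> simp_all

theorem contrib_up (grid : List String) (S y x : Int) (c c' : Char)
    (hcU : pvCell grid (y - 1) x = some c') (hcC : pvCell grid y x = some c) (hy1 : y < S) :
    pvContrib grid S (y - 1) x (y, x) = if c' ≠ '#' ∧ c ≠ '#' then 1 else 0 := by
  have hyy : y - 1 + 1 = y := by ring
  have e1 : ¬((y, x) = ((y - 1, x) : Int × Int)) := by simp only [Prod.mk.injEq, not_and]; intro h; omega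
  have e2 : ¬((y, x) = ((y - 1, x + 1) : Int × Int)) := by simp only [Prod.mk.injEq, not_and]; intro h; omega
  unfold pvContrib
  rw [hcU, hyy]
  simp [hcC, hy1, e1, e2]
  split_ifs <;> simp_all

theorem pvDeg_value (grid : List String) (hpre : Pre_find_junctions grid) (y x : Int)
    (hy0 : 0 ≤ y) (hy1 : y < (grid.length : Int)) (hx0 : 0 ≤ x) (hx1 : x < (grid.length : Int))
    (c : Char) (hc : pvCell grid y x = some c) :
    ((PySem.List.pyRange 0 (grid.length : Int) 1).map (fun j =>
      ((PySem.List.pyRange 0 (grid.length : Int) 1).map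
        (fun i => pvContrib grid (grid.length : Int) j i (y, x))).sum)).sum
    = if c = '#' then 0 else
        ([((1:Int),(0:Int)), (-1,0), (0,1), (0,-1)]).foldl
          (fun n d =>
            if 0 ≤ x + d.1 ∧ x + d.1 < (grid.length : Int) ∧ 0 ≤ y + d.2 ∧ y + d.2 < (grid.length : Int) ∧
                pvCell grid (y + d.2) (x + d.1) ≠ some '#'
            then n + 1 else n) 0 := by
  have nd := PySem.List.nodup_pyRange_one 0 ((grid.length : Int))
  have houter : ∀ j, j ≠ y - 1 → j ≠ y →
      ((PySem.List.pyRange 0 (grid.length : Int) 1).map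
        (fun i => pvContrib grid (grid.length : Int) j i (y, x))).sum = 0 := by
    intro j hj1 hj2
    apply List.sum_eq_zero
    intro v hv
    simp only [List.mem_map] at hv
    obtain ⟨i, _, rfl⟩ := hv
    apply pvContrib_support <;> (simp only [ne_eq, Prod.mk.injEq, not_and]; intro h; omega)
  rw [sum_map_support2 (show y - 1 ≠ y by omega) houter _ nd]
  have hRowY : ((PySem.List.pyRange 0 (grid.length : Int) 1).map
      (fun i => pvContrib grid (grid.length : Int) y i (y, x))).sum
      = (if 0 ≤ x - 1 then pvContrib grid (grid.length : Int) y (x - 1) (y, x) else 0)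
        + pvContrib grid (grid.length : Int) y x (y, x) := by
    have hsup : ∀ i, i ≠ x - 1 → i ≠ x →
        pvContrib grid (grid.length : Int) y i (y, x) = 0 := by
      intro i hi1 hi2
      apply pvContrib_support <;> (simp only [ne_eq, Prod.mk.injEq, not_and]; intro h; omega)
    rw [sum_map_support2 (show x - 1 ≠ x by omega) hsup _ nd]
    simp only [PySem.List.mem_pyRange_one]
    by_cases hxm : 0 ≤ x - 1
    · rw [if_pos (show (0:Int) ≤ x - 1 ∧ x - 1 < (grid.length : Int) from ⟨hxm, by omega⟩),
        if_pos (show (0:Int) ≤ x ∧ x < (grid.length : Int) from ⟨hx0, hx1⟩), if_pos hxm]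
    · rw [if_neg (show ¬((0:Int) ≤ x - 1 ∧ x - 1 < (grid.length : Int)) from fun hh => hxm hh.1),
        if_pos (show (0:Int) ≤ x ∧ x < (grid.length : Int) from ⟨hx0, hx1⟩), if_neg hxm]
  have hRowU : ((PySem.List.pyRange 0 (grid.length : Int) 1).map
      (fun i => pvContrib grid (grid.length : Int) (y - 1) i (y, x))).sum
      = pvContrib grid (grid.length : Int) (y - 1) x (y, x) := by
    have hsup : ∀ i, i ≠ x →
        pvContrib grid (grid.length : Int) (y - 1) i (y, x) = 0 := by
      intro i hi
      apply pvContrib_support <;> (simp only [ne_eq, Prod.mk.injEq, not_and]; intro h; omega)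
    rw [sum_map_support1 hsup _ nd]
    simp only [PySem.List.mem_pyRange_one]
    rw [if_pos (show (0:Int) ≤ x ∧ x < (grid.length : Int) from ⟨hx0, hx1⟩)]
  simp only [hRowY, hRowU, PySem.List.mem_pyRange_one]
  rw [if_pos (show (0:Int) ≤ y ∧ y < (grid.length : Int) from ⟨hy0, hy1⟩)]
  simp only [List.foldl, pv_ite_add, zero_add]
  have ex : x + -1 = x - 1 := by ring
  have ey : y + -1 = y - 1 := by ring
  simp only [add_zero, ex, ey]
  by_cases hcw : c = '#'
  · rw [if_pos hcw]
    have hC : pvContrib grid (grid.length : Int) y x (y, x) = 0 := by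
      unfold pvContrib; rw [hc]; simp [hcw]
    rw [hC]
    by_cases hxm : 0 ≤ x - 1
    · obtain ⟨c', hcL⟩ := pvCell_some grid hpre y (x - 1) hy0 hy1 hxm (by omega)
      rw [if_pos hxm, contrib_left grid _ y x c c' hcL hc hx1]
      by_cases hym : 0 ≤ y - 1
      · obtain ⟨c'', hcU⟩ := pvCell_some grid hpre (y - 1) x hym (by omega) hx0 hx1
        rw [if_pos (show (0:Int) ≤ y - 1 ∧ y - 1 < (grid.length : Int) from ⟨hym, by omega⟩),
          contrib_up grid _ y x c c'' hcU hc hy1]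
        simp [hcw]
      · rw [if_neg (show ¬((0:Int) ≤ y - 1 ∧ y - 1 < (grid.length : Int)) from fun hh => hym hh.1)]
        simp [hcw]
    · rw [if_neg hxm]
      by_cases hym : 0 ≤ y - 1
      · obtain ⟨c'', hcU⟩ := pvCell_some grid hpre (y - 1) x hym (by omega) hx0 hx1
        rw [if_pos (show (0:Int) ≤ y - 1 ∧ y - 1 < (grid.length : Int) from ⟨hym, by omega⟩),
          contrib_up grid _ y x c c'' hcU hc hy1]
        simp [hcw]
      · rw [if_neg (show ¬((0:Int) ≤ y - 1 ∧ y - 1 < (grid.length : Int)) from fun hh => hym hh.1)]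
        simp
  · rw [if_neg hcw, contrib_center grid _ y x c hc hcw]
    by_cases hxm : 0 ≤ x - 1
    · obtain ⟨c', hcL⟩ := pvCell_some grid hpre y (x - 1) hy0 hy1 hxm (by omega)
      rw [if_pos hxm, contrib_left grid _ y x c c' hcL hc hx1]
      by_cases hym : 0 ≤ y - 1
      · obtain ⟨c'', hcU⟩ := pvCell_some grid hpre (y - 1) x hym (by omega) hx0 hx1
        rw [if_pos (show (0:Int) ≤ y - 1 ∧ y - 1 < (grid.length : Int) from ⟨hym, by omega⟩),
          contrib_up grid _ y x c c'' hcU hc hy1]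
        simp only [hcL, hcU]
        simp [hcw, hx0, hx1, hy0, hy1,
          show (0:Int) ≤ x + 1 by omega, show x - 1 < (grid.length : Int) by omega,
          show (0:Int) ≤ y + 1 by omega, show y - 1 < (grid.length : Int) by omega,
          show (1:Int) ≤ x by omega, show (1:Int) ≤ y by omega, ite_not]
        ring
      · rw [if_neg (show ¬((0:Int) ≤ y - 1 ∧ y - 1 < (grid.length : Int)) from fun hh => hym hh.1)]
        simp only [hcL]
        simp [hcw, hx0, hx1, hy0, hy1,
          show (0:Int) ≤ x + 1 by omega, show x - 1 < (grid.length : Int) by omega,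
          show (0:Int) ≤ y + 1 by omega,
          show (1:Int) ≤ x by omega, show ¬(1:Int) ≤ y by omega, ite_not]
        ring
    · rw [if_neg hxm]
      by_cases hym : 0 ≤ y - 1
      · obtain ⟨c'', hcU⟩ := pvCell_some grid hpre (y - 1) x hym (by omega) hx0 hx1
        rw [if_pos (show (0:Int) ≤ y - 1 ∧ y - 1 < (grid.length : Int) from ⟨hym, by omega⟩),
          contrib_up grid _ y x c c'' hcU hc hy1]
        simp only [hcU]
        simp [hcw, hx0, hx1, hy0, hy1,
          show (0:Int) ≤ x + 1 by omega,
          show (0:Int) ≤ y + 1 by omega, show y - 1 < (grid.length : Int) by omega,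
          show ¬(1:Int) ≤ x by omega, show (1:Int) ≤ y by omega, ite_not]
        ring
      · rw [if_neg (show ¬((0:Int) ≤ y - 1 ∧ y - 1 < (grid.length : Int)) from fun hh => hym hh.1)]
        simp [hx0, hx1, hy0, hy1,
          show (0:Int) ≤ x + 1 by omega,
          show (0:Int) ≤ y + 1 by omega,
          show ¬(1:Int) ≤ x by omega, show ¬(1:Int) ≤ y by omega]

-- ===== VERDICT (by name: the statement is the Claim_ definition above) =====
theorem find_junctions_spec : Claim_equal_find_junctions := by
  intro grid _ hpre
  unfold Spec_find_junctions
  simp only [find_junctions, find_junctions_alt]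
  refine PySem.List.foldl_congr_mem' _ _ _ _ ?_
  intro y hy s
  refine PySem.List.foldl_congr_mem' _ _ _ _ ?_
  intro x hx s'
  rw [PySem.List.mem_pyRange_one] at hy hx
  obtain ⟨c, hc⟩ := pvCell_some grid hpre y x hy.1 hy.2 hx.1 hx.2
  have hdeg : ((PySem.List.pyRange 0 (grid.length : Int) 1).foldl (fun d y =>
      (PySem.List.pyRange 0 (grid.length : Int) 1).foldl
        (fun d x => pvDegStep grid (grid.length : Int) d y x) d) PySem.Dict.empty).getD (y, x) 0
      = if c = '#' then 0 else
          ([((1:Int),(0:Int)), (-1,0), (0,1), (0,-1)]).foldl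
            (fun n d =>
              if 0 ≤ x + d.1 ∧ x + d.1 < (grid.length : Int) ∧ 0 ≤ y + d.2 ∧ y + d.2 < (grid.length : Int) ∧
                  pvCell grid (y + d.2) (x + d.1) ≠ some '#'
              then n + 1 else n) 0 := by
    rw [pvOuterFold_getD, PySem.Dict.getD_empty, zero_add,
      pvDeg_value grid hpre y x hy.1 hy.2 hx.1 hx.2 c hc]
  rw [hc, hdeg]
  by_cases hcw : c = '#'
  · simp [hcw]
  · simp only [hcw, ite_false]
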